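-- pv_equiv track=rewrite | github.com/johlys/compound_preparation | scripts/charge_RDKit_moldesc.py | reformat_rules
-- ===== SOURCE A (Python) =====
-- def reformat_rules(rules):
-- #OPENEYE has got a problem with writting [NH3+], ...
-- 	rule_counter = 0
-- 	for rule in rules:
-- 		trans_counter = 0
-- 		for transformation in rule[0]:
-- 			educt, product = transformation.split('>>')
-- 			#primary amines
-- 			product = product.replace('[NH3+]', '[N+]([H])([H])[H]')
-- 			#secundary amines
-- 			product = product.replace('[NH2+]', '[N+]([H])([H])')
-- 			#tertary amines
-- 			product = product.replace('[NH+]', '[N+]([H])')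
-- 			product = product.replace('[nH+]', '[n+]([H])')
-- 			product = product.replace('[nH]', '[n]([H])')
-- 			reaction = educt + '>>' + product
-- 			#print reaction
-- 			rules[rule_counter][0][trans_counter] = reaction
-- 			trans_counter = trans_counter + 1
-- 		rule_counter = rule_counter + 1
-- 	return rules
-- ===== SOURCE B (Python) =====
-- # Single left-to-right scan over the product with a pattern table, building new
-- # lists instead of mutating in place (return value only; A also mutates its argument).
-- _TABLE = [
--     ('[NH3+]', '[N+]([H])([H])[H]'),
--     ('[NH2+]', '[N+]([H])([H])'),
--     ('[NH+]', '[N+]([H])'),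
--     ('[nH+]', '[n+]([H])'),
--     ('[nH]', '[n]([H])'),
-- ]
--
-- def _fix(transformation):
--     educt, product = transformation.split('>>')
--     out = []
--     i = 0
--     n = len(product)
--     while i < n:
--         for pat, rep in _TABLE:
--             if product.startswith(pat, i):
--                 out.append(rep)
--                 i += len(pat)
--                 break
--         else:
--             out.append(product[i])
--             i += 1
--     return educt + '>>' + ''.join(out)
--
-- def reformat_rules(rules):
--     return [[[_fix(t) for t in grp] if j == 0 else grp
--              for j, grp in enumerate(rule)]
--             for rule in rules]
-- ===== Notes on version B (the rewrite author's own statement) =====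
-- stated objective: alternative
-- what changed: Replaces the five sequential full-string .replace passes and the in-place counter-indexed writes with a single left-to-right scan over the product using a pattern table (first matching pattern substituted, cursor advanced past it) and list comprehensions that rebuild the structure instead of mutating it.
import Mathlib
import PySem

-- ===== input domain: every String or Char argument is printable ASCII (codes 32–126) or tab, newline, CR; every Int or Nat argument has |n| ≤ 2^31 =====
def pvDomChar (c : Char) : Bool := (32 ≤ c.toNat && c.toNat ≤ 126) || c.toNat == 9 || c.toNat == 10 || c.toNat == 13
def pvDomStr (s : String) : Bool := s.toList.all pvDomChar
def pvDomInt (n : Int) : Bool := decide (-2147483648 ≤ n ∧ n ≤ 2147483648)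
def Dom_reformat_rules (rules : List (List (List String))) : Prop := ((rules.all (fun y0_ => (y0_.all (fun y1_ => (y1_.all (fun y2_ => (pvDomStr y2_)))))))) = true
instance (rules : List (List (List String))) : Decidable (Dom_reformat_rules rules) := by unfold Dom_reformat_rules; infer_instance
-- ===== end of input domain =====

-- B rewrites A's five sequential .replace passes as one left-to-right table-driven scan and
-- rebuilds the lists with comprehensions instead of mutating in place; equivalence is about the
-- RETURN value only (Python A also mutates its argument in place, B does not).

-- ===== PORT A =====
def pvFixA (transformation : String) : String :=
  match PySem.Str.split? transformation ">>" with
  | some [educt, product] =>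
    let product1 := PySem.Str.replace product "[NH3+]" "[N+]([H])([H])[H]"
    let product2 := PySem.Str.replace product1 "[NH2+]" "[N+]([H])([H])"
    let product3 := PySem.Str.replace product2 "[NH+]" "[N+]([H])"
    let product4 := PySem.Str.replace product3 "[nH+]" "[n+]([H])"
    let product5 := PySem.Str.replace product4 "[nH]" "[n]([H])"
    educt ++ ">>" ++ product5
  | _ => transformation     -- unreachable under Pre_ (Python raises ValueError on unpack)

-- rules[rule_counter][0][trans_counter] = reaction; trans_counter = trans_counter + 1
def pvInnerStep (ruleCounter : Nat) (st : List (List (List String)) × Nat) (transformation : String) :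
    List (List (List String)) × Nat :=
  let reaction := pvFixA transformation
  let cur := st.1.getD ruleCounter []
  (st.1.set ruleCounter (cur.set 0 ((cur.headD []).set st.2 reaction)), st.2 + 1)

-- for transformation in rule[0]: … ; rule_counter = rule_counter + 1
def pvOuterStep (st : List (List (List String)) × Nat) (rule : List (List String)) :
    List (List (List String)) × Nat :=
  (((rule.headD []).foldl (pvInnerStep st.2) (st.1, 0)).1, st.2 + 1)

def reformat_rules (rules : List (List (List String))) : List (List (List String)) :=
  (rules.foldl pvOuterStep (rules, 0)).1

-- ===== PORT B =====
def pvPat1 : List Char := ['[', 'N', 'H', '3', '+', ']']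
def pvRep1 : List Char := ['[', 'N', '+', ']', '(', '[', 'H', ']', ')', '(', '[', 'H', ']', ')', '[', 'H', ']']
def pvPat2 : List Char := ['[', 'N', 'H', '2', '+', ']']
def pvRep2 : List Char := ['[', 'N', '+', ']', '(', '[', 'H', ']', ')', '(', '[', 'H', ']', ')']
def pvPat3 : List Char := ['[', 'N', 'H', '+', ']']
def pvRep3 : List Char := ['[', 'N', '+', ']', '(', '[', 'H', ']', ')']
def pvPat4 : List Char := ['[', 'n', 'H', '+', ']']
def pvRep4 : List Char := ['[', 'n', '+', ']', '(', '[', 'H', ']', ')']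
def pvPat5 : List Char := ['[', 'n', 'H', ']']
def pvRep5 : List Char := ['[', 'n', ']', '(', '[', 'H', ']', ')']

-- the while-loop of Source B: the first matching table pattern is substituted, the cursor jumps past it
def pvScan : List Char → List Char
  | [] => []
  | c :: t =>
    if pvPat1.isPrefixOf (c :: t) then pvRep1 ++ pvScan (t.drop 5)
    else if pvPat2.isPrefixOf (c :: t) then pvRep2 ++ pvScan (t.drop 5)
    else if pvPat3.isPrefixOf (c :: t) then pvRep3 ++ pvScan (t.drop 4)
    else if pvPat4.isPrefixOf (c :: t) then pvRep4 ++ pvScan (t.drop 4)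
    else if pvPat5.isPrefixOf (c :: t) then pvRep5 ++ pvScan (t.drop 3)
    else c :: pvScan t
termination_by l => l.length
decreasing_by all_goals simp

def pvFixB (transformation : String) : String :=
  match PySem.Str.split? transformation ">>" with
  | some [educt, product] => educt ++ ">>" ++ String.ofList (pvScan product.toList)
  | _ => transformation     -- unreachable under Pre_ (Python raises ValueError on unpack)

def reformat_rules_alt (rules : List (List (List String))) : List (List (List String)) :=
  rules.map (fun rule =>
    (PySem.List.enumerate rule).map (fun jg => if jg.1 = 0 then jg.2.map pvFixB else jg.2))

-- ===== PRECONDITION & SPEC =====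
-- Pre_ excludes exactly the inputs where Python A raises: an empty rule (IndexError on rule[0])
-- or a transformation in rule[0] whose split('>>') does not have exactly two parts (ValueError).
def Pre_reformat_rules (rules : List (List (List String))) : Prop :=
  ∀ rule ∈ rules, rule ≠ [] ∧ ∀ t ∈ rule.headD [], PySem.Str.count t ">>" = 1
instance (rules : List (List (List String))) : Decidable (Pre_reformat_rules rules) := by
  unfold Pre_reformat_rules; infer_instance

def pvWitness_reformat_rules : List (List (List String)) :=
  [[["CC(N)=O>>[NH3+]C"], ["extra"]], [["c1ccncc1>>c1cc[nH+]cc1"]]]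

def Spec_reformat_rules (rules : List (List (List String))) (out : List (List (List String))) : Prop := out = reformat_rules_alt rules
instance (rules : List (List (List String))) (out : List (List (List String))) : Decidable (Spec_reformat_rules rules out) := by unfold Spec_reformat_rules; infer_instance

-- ===== CLAIM (what is proved, stated in full; the proofs are below) =====
def Claim_equal_reformat_rules : Prop := ∀ (rules : List (List (List String))), Dom_reformat_rules rules → Pre_reformat_rules rules → Spec_reformat_rules rules (reformat_rules rules)

-- ===== LEMMAS AND PROOFS =====

-- structural mirror of PySem.Chars.replace (for a nonempty pattern)
def pvRepSpec (old new : List Char) : List Char → List Char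
  | [] => []
  | c :: t =>
    if old.isPrefixOf (c :: t) then new ++ pvRepSpec old new (t.drop (old.length - 1))
    else c :: pvRepSpec old new t
termination_by l => l.length
decreasing_by all_goals simp

theorem pvReplace_go_eq (old new : List Char) (h : old ≠ []) :
    ∀ (fuel : Nat) (l acc : List Char), l.length ≤ fuel →
      PySem.Chars.replace.go old new fuel l acc = acc.reverse ++ pvRepSpec old new l := by
  intro fuel
  induction fuel with
  | zero =>
    intro l acc hl
    have : l = [] := List.eq_nil_of_length_eq_zero (Nat.le_zero.mp hl)
    subst this
    simp [PySem.Chars.replace.go, pvRepSpec]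
  | succ n ih =>
    intro l acc hl
    cases l with
    | nil => simp [PySem.Chars.replace.go, pvRepSpec]
    | cons c t =>
      by_cases hpre : old.isPrefixOf (c :: t)
      · rw [show PySem.Chars.replace.go old new (n+1) (c :: t) acc
            = PySem.Chars.replace.go old new n (List.drop old.length (c :: t)) (new.reverse ++ acc) by
          simp [PySem.Chars.replace.go, hpre]]
        have h1 : 0 < old.length := List.length_pos_of_ne_nil h
        have hlen : (List.drop old.length (c :: t)).length ≤ n := by
          simp at hl ⊢; omega
        rw [ih _ _ hlen]
        obtain ⟨o, os, rfl⟩ := List.exists_cons_of_ne_nil h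
        simp [pvRepSpec, hpre]
      · rw [show PySem.Chars.replace.go old new (n+1) (c :: t) acc
            = PySem.Chars.replace.go old new n t (c :: acc) by
          simp [PySem.Chars.replace.go, hpre]]
        rw [ih _ _ (by simpa using Nat.le_of_succ_le_succ (by simpa using hl))]
        simp [pvRepSpec, hpre]

theorem pvReplace_eq (old new l : List Char) (h : old ≠ []) :
    PySem.Chars.replace l old new = pvRepSpec old new l := by
  unfold PySem.Chars.replace
  rw [if_neg (by simpa using h)]
  simpa using pvReplace_go_eq old new h l.length l [] le_rfl

theorem pvRepSpec_skip (old new : List Char) (_h : old ≠ []) :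
    ∀ (k : Nat) (l : List Char), (∀ i, i < k → ¬ old <+: l.drop i) →
      pvRepSpec old new l = l.take k ++ pvRepSpec old new (l.drop k) := by
  intro k
  induction k with
  | zero => intro l _; simp
  | succ n ih =>
    intro l hl
    cases l with
    | nil => simp [pvRepSpec]
    | cons c t =>
      have h0 : ¬ old <+: c :: t := by simpa using hl 0 (Nat.succ_pos n)
      rw [show pvRepSpec old new (c :: t) = c :: pvRepSpec old new t by
        simp only [pvRepSpec]
        rw [if_neg (by simpa [List.isPrefixOf_iff_prefix] using h0)]]
      rw [ih t (fun i hi => by simpa using hl (i + 1) (by omega))]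
      simp

theorem pvRepSpec_pass (p new a b : List Char) (hp : p ≠ [])
    (hpair : ∀ i, i < a.length → ¬ p <+: a.drop i ∧ ¬ a.drop i <+: p) :
    pvRepSpec p new (a ++ b) = a ++ pvRepSpec p new b := by
  rw [pvRepSpec_skip p new hp a.length (a ++ b) ?_]
  · simp
  · intro i hi hcon
    rw [List.drop_append_of_le_length (Nat.le_of_lt hi)] at hcon
    rcases List.prefix_or_prefix_of_prefix hcon (List.prefix_append _ _) with h1 | h2
    · exact (hpair i hi).1 h1
    · exact (hpair i hi).2 h2

theorem pvRepSpec_head (p new b : List Char) (hp : p ≠ []) :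
    pvRepSpec p new (p ++ b) = new ++ pvRepSpec p new b := by
  obtain ⟨o, os, rfl⟩ := List.exists_cons_of_ne_nil hp
  rw [show (o :: os) ++ b = o :: (os ++ b) by simp]
  rw [show pvRepSpec (o :: os) new (o :: (os ++ b))
      = new ++ pvRepSpec (o :: os) new ((os ++ b).drop ((o :: os).length - 1)) by
    simp only [pvRepSpec]
    rw [if_pos (by simp [List.isPrefixOf_iff_prefix])]]
  simp

theorem pvHead_preserve (p new q : List Char) (hp : p ≠ [])
    (hq : '[' ∉ q.tail) (hnew : new.head? = some '[')
    (c : Char) (t : List Char) (h : ¬ q <+: c :: t) : ¬ q <+: c :: pvRepSpec p new t := by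
  intro hpre
  cases q with
  | nil => exact h (List.nil_prefix)
  | cons a q' =>
    rw [List.cons_prefix_cons] at hpre
    obtain ⟨rfl, hq'⟩ := hpre
    by_cases hex : ∃ j, j < q'.length ∧ p <+: t.drop j
    · have hjspec := Nat.find_spec hex
      set j := Nat.find hex with hjdef
      have hmin : ∀ i, i < j → ¬ p <+: t.drop i := by
        intro i hi hcon
        exact Nat.find_min hex hi ⟨by omega, hcon⟩
      have hsplit := pvRepSpec_skip p new hp j t hmin
      have hne : t.drop j ≠ [] := by
        intro hnil
        rw [hnil] at hjspec
        exact hp (List.prefix_nil.mp hjspec.2)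
      obtain ⟨u, hu⟩ := hjspec.2
      have hjt : j < t.length := by
        by_contra hge
        exact hne (List.drop_eq_nil_of_le (by omega))
      have hval : (pvRepSpec p new t)[j]? = some '[' := by
        rw [hsplit, ← hu, pvRepSpec_head p new u hp]
        have hlt : (List.take j t).length = j := by simp [List.length_take]; omega
        rw [List.getElem?_append_right (by rw [hlt]), hlt, Nat.sub_self]
        cases new with
        | nil => exact absurd hnew (by simp)
        | cons n0 ns => simp at hnew; simp [hnew]
      have hqval : q'[j]? = some '[' := by
        obtain ⟨w, hw⟩ := hq'
        rw [← hval, ← hw, List.getElem?_append_left hjspec.1]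
      exact hq (by simpa using List.mem_of_getElem? hqval)
    · have hex' : ∀ i, i < q'.length → ¬ p <+: t.drop i :=
        fun i hi hcon => hex ⟨i, hi, hcon⟩
      have hsplit := pvRepSpec_skip p new hp q'.length t hex'
      by_cases hlen : q'.length ≤ t.length
      · have : q' <+: t.take q'.length := by
          apply (List.isPrefix_append_of_length ?_).mp (hsplit ▸ hq')
          simp [List.length_take]; omega
        exact h (List.cons_prefix_cons.mpr ⟨rfl, this.trans (List.take_prefix _ _)⟩)
      · have htk : t.take q'.length = t := List.take_of_length_le (by omega)
        have hdr : t.drop q'.length = [] := List.drop_eq_nil_of_le (by omega)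
        rw [hsplit, htk, hdr] at hq'
        simp [pvRepSpec] at hq'
        exact h (List.cons_prefix_cons.mpr ⟨rfl, hq'⟩)

theorem pvRepSpec_cons_neg (p new : List Char) (c : Char) (t : List Char) (h : ¬ p <+: c :: t) :
    pvRepSpec p new (c :: t) = c :: pvRepSpec p new t := by
  simp only [pvRepSpec]
  rw [if_neg (by simpa [List.isPrefixOf_iff_prefix] using h)]

theorem pvChain_eq_scan (l : List Char) :
    pvRepSpec pvPat5 pvRep5 (pvRepSpec pvPat4 pvRep4 (pvRepSpec pvPat3 pvRep3
      (pvRepSpec pvPat2 pvRep2 (pvRepSpec pvPat1 pvRep1 l)))) = pvScan l := by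
  induction l using pvScan.induct with
  | case1 => simp [pvRepSpec, pvScan]
  | case2 c t h1 ih =>
    obtain ⟨u, hu⟩ : pvPat1 <+: c :: t := by simpa [List.isPrefixOf_iff_prefix] using h1
    have hu' : u = t.drop 5 := by
      have h' := congrArg (List.drop pvPat1.length) hu
      rw [List.drop_left] at h'
      simpa using h'
    have hs : pvScan (c :: t) = pvRep1 ++ pvScan (t.drop 5) := by
      simp only [pvScan]; rw [if_pos h1]
    rw [hs, ← hu,
        pvRepSpec_head pvPat1 pvRep1 u (by decide),
        pvRepSpec_pass pvPat2 pvRep2 pvRep1 _ (by decide) (by decide),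
        pvRepSpec_pass pvPat3 pvRep3 pvRep1 _ (by decide) (by decide),
        pvRepSpec_pass pvPat4 pvRep4 pvRep1 _ (by decide) (by decide),
        pvRepSpec_pass pvPat5 pvRep5 pvRep1 _ (by decide) (by decide),
        hu', ih]
  | case3 c t h1 h2 ih =>
    obtain ⟨u, hu⟩ : pvPat2 <+: c :: t := by simpa [List.isPrefixOf_iff_prefix] using h2
    have hu' : u = t.drop 5 := by
      have h' := congrArg (List.drop pvPat2.length) hu
      rw [List.drop_left] at h'
      simpa using h'
    have hs : pvScan (c :: t) = pvRep2 ++ pvScan (t.drop 5) := by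
      simp only [pvScan]; rw [if_neg h1, if_pos h2]
    rw [hs, ← hu,
        pvRepSpec_pass pvPat1 pvRep1 pvPat2 _ (by decide) (by decide),
        pvRepSpec_head pvPat2 pvRep2 _ (by decide),
        pvRepSpec_pass pvPat3 pvRep3 pvRep2 _ (by decide) (by decide),
        pvRepSpec_pass pvPat4 pvRep4 pvRep2 _ (by decide) (by decide),
        pvRepSpec_pass pvPat5 pvRep5 pvRep2 _ (by decide) (by decide),
        hu', ih]
  | case4 c t h1 h2 h3 ih =>
    obtain ⟨u, hu⟩ : pvPat3 <+: c :: t := by simpa [List.isPrefixOf_iff_prefix] using h3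
    have hu' : u = t.drop 4 := by
      have h' := congrArg (List.drop pvPat3.length) hu
      rw [List.drop_left] at h'
      simpa using h'
    have hs : pvScan (c :: t) = pvRep3 ++ pvScan (t.drop 4) := by
      simp only [pvScan]; rw [if_neg h1, if_neg h2, if_pos h3]
    rw [hs, ← hu,
        pvRepSpec_pass pvPat1 pvRep1 pvPat3 _ (by decide) (by decide),
        pvRepSpec_pass pvPat2 pvRep2 pvPat3 _ (by decide) (by decide),
        pvRepSpec_head pvPat3 pvRep3 _ (by decide),
        pvRepSpec_pass pvPat4 pvRep4 pvRep3 _ (by decide) (by decide),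
        pvRepSpec_pass pvPat5 pvRep5 pvRep3 _ (by decide) (by decide),
        hu', ih]
  | case5 c t h1 h2 h3 h4 ih =>
    obtain ⟨u, hu⟩ : pvPat4 <+: c :: t := by simpa [List.isPrefixOf_iff_prefix] using h4
    have hu' : u = t.drop 4 := by
      have h' := congrArg (List.drop pvPat4.length) hu
      rw [List.drop_left] at h'
      simpa using h'
    have hs : pvScan (c :: t) = pvRep4 ++ pvScan (t.drop 4) := by
      simp only [pvScan]; rw [if_neg h1, if_neg h2, if_neg h3, if_pos h4]
    rw [hs, ← hu,
        pvRepSpec_pass pvPat1 pvRep1 pvPat4 _ (by decide) (by decide),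
        pvRepSpec_pass pvPat2 pvRep2 pvPat4 _ (by decide) (by decide),
        pvRepSpec_pass pvPat3 pvRep3 pvPat4 _ (by decide) (by decide),
        pvRepSpec_head pvPat4 pvRep4 _ (by decide),
        pvRepSpec_pass pvPat5 pvRep5 pvRep4 _ (by decide) (by decide),
        hu', ih]
  | case6 c t h1 h2 h3 h4 h5 ih =>
    obtain ⟨u, hu⟩ : pvPat5 <+: c :: t := by simpa [List.isPrefixOf_iff_prefix] using h5
    have hu' : u = t.drop 3 := by
      have h' := congrArg (List.drop pvPat5.length) hu
      rw [List.drop_left] at h'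
      simpa using h'
    have hs : pvScan (c :: t) = pvRep5 ++ pvScan (t.drop 3) := by
      simp only [pvScan]; rw [if_neg h1, if_neg h2, if_neg h3, if_neg h4, if_pos h5]
    rw [hs, ← hu,
        pvRepSpec_pass pvPat1 pvRep1 pvPat5 _ (by decide) (by decide),
        pvRepSpec_pass pvPat2 pvRep2 pvPat5 _ (by decide) (by decide),
        pvRepSpec_pass pvPat3 pvRep3 pvPat5 _ (by decide) (by decide),
        pvRepSpec_pass pvPat4 pvRep4 pvPat5 _ (by decide) (by decide),
        pvRepSpec_head pvPat5 pvRep5 _ (by decide),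
        hu', ih]
  | case7 c t h1 h2 h3 h4 h5 ih =>
    have m1 : ¬ pvPat1 <+: c :: t := by simpa [List.isPrefixOf_iff_prefix] using h1
    have m2 : ¬ pvPat2 <+: c :: t := by simpa [List.isPrefixOf_iff_prefix] using h2
    have m3 : ¬ pvPat3 <+: c :: t := by simpa [List.isPrefixOf_iff_prefix] using h3
    have m4 : ¬ pvPat4 <+: c :: t := by simpa [List.isPrefixOf_iff_prefix] using h4
    have m5 : ¬ pvPat5 <+: c :: t := by simpa [List.isPrefixOf_iff_prefix] using h5
    have n2 := pvHead_preserve pvPat1 pvRep1 pvPat2 (by decide) (by decide) (by decide) c t m2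
    have n3 := pvHead_preserve pvPat2 pvRep2 pvPat3 (by decide) (by decide) (by decide) c _
      (pvHead_preserve pvPat1 pvRep1 pvPat3 (by decide) (by decide) (by decide) c t m3)
    have n4 := pvHead_preserve pvPat3 pvRep3 pvPat4 (by decide) (by decide) (by decide) c _
      (pvHead_preserve pvPat2 pvRep2 pvPat4 (by decide) (by decide) (by decide) c _
        (pvHead_preserve pvPat1 pvRep1 pvPat4 (by decide) (by decide) (by decide) c t m4))
    have n5 := pvHead_preserve pvPat4 pvRep4 pvPat5 (by decide) (by decide) (by decide) c _
      (pvHead_preserve pvPat3 pvRep3 pvPat5 (by decide) (by decide) (by decide) c _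
        (pvHead_preserve pvPat2 pvRep2 pvPat5 (by decide) (by decide) (by decide) c _
          (pvHead_preserve pvPat1 pvRep1 pvPat5 (by decide) (by decide) (by decide) c t m5)))
    rw [pvRepSpec_cons_neg pvPat1 pvRep1 c t m1,
        pvRepSpec_cons_neg pvPat2 pvRep2 c _ n2,
        pvRepSpec_cons_neg pvPat3 pvRep3 c _ n3,
        pvRepSpec_cons_neg pvPat4 pvRep4 c _ n4,
        pvRepSpec_cons_neg pvPat5 pvRep5 c _ n5,
        ih]
    simp only [pvScan]
    rw [if_neg h1, if_neg h2, if_neg h3, if_neg h4, if_neg h5]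

theorem pvFix_core (product : String) :
    PySem.Str.replace (PySem.Str.replace (PySem.Str.replace (PySem.Str.replace (PySem.Str.replace
      product "[NH3+]" "[N+]([H])([H])[H]") "[NH2+]" "[N+]([H])([H])") "[NH+]" "[N+]([H])")
      "[nH+]" "[n+]([H])") "[nH]" "[n]([H])"
      = String.ofList (pvScan product.toList) := by
  simp only [PySem.Str.replace, String.toList_ofList]
  rw [pvReplace_eq _ _ _ (by decide), pvReplace_eq _ _ _ (by decide), pvReplace_eq _ _ _ (by decide),
      pvReplace_eq _ _ _ (by decide), pvReplace_eq _ _ _ (by decide)]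
  exact congrArg String.ofList (pvChain_eq_scan product.toList)

theorem pvFix_eq (t : String) : pvFixA t = pvFixB t := by
  unfold pvFixA pvFixB
  cases hs : PySem.Str.split? t ">>" with
  | none => rfl
  | some parts =>
    rcases parts with _ | ⟨e, _ | ⟨p, _ | ⟨x, rest⟩⟩⟩
    · rfl
    · rfl
    · simpa using pvFix_core p
    · rfl

def pvProc (rule : List (List String)) : List (List String) :=
  match rule with
  | [] => []
  | g :: gs => g.map pvFixA :: gs

theorem pvInner_spec :
    ∀ (ts g₁ : List String) (gs : List (List String)) (done l : List (List (List String))),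
      ts.foldl (pvInnerStep done.length) (done ++ ((g₁ ++ ts) :: gs) :: l, g₁.length)
        = (done ++ ((g₁ ++ ts.map pvFixA) :: gs) :: l, g₁.length + ts.length) := by
  intro ts
  induction ts with
  | nil => intro g₁ gs done l; simp
  | cons t ts ih =>
    intro g₁ gs done l
    rw [List.foldl_cons]
    have hstep : pvInnerStep done.length (done ++ ((g₁ ++ t :: ts) :: gs) :: l, g₁.length) t
        = (done ++ (((g₁ ++ [pvFixA t]) ++ ts) :: gs) :: l, (g₁ ++ [pvFixA t]).length) := by
      unfold pvInnerStep
      have hget : (done ++ ((g₁ ++ t :: ts) :: gs) :: l).getD done.length [] = (g₁ ++ t :: ts) :: gs := by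
        simp [List.getD]
      rw [hget]
      simp only [List.headD_cons]
      have hset1 : (g₁ ++ t :: ts).set g₁.length (pvFixA t) = g₁ ++ pvFixA t :: ts := by
        rw [List.set_append_right _ _ (le_refl g₁.length)]
        simp
      rw [hset1]
      have hset2 : (done ++ ((g₁ ++ t :: ts) :: gs) :: l).set done.length
          ((((g₁ ++ t :: ts) :: gs)).set 0 (g₁ ++ pvFixA t :: ts))
          = done ++ ((g₁ ++ pvFixA t :: ts) :: gs) :: l := by
        rw [List.set_append_right _ _ (le_refl done.length)]
        simp
      rw [hset2]
      simp
    rw [hstep, ih (g₁ ++ [pvFixA t]) gs done l]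
    simp [Nat.add_comm, Nat.add_left_comm]

theorem pvOuter_spec :
    ∀ (rs done : List (List (List String))),
      (rs.foldl pvOuterStep (done ++ rs, done.length)).1 = done ++ rs.map pvProc := by
  intro rs
  induction rs with
  | nil => intro done; simp
  | cons r rs ih =>
    intro done
    rw [List.foldl_cons]
    have hstep : pvOuterStep (done ++ r :: rs, done.length) r = (done ++ pvProc r :: rs, done.length + 1) := by
      unfold pvOuterStep
      cases r with
      | nil => simp [pvProc]
      | cons g gs =>
        simp only [List.headD_cons]
        have h0 : done ++ (g :: gs) :: rs = done ++ ((([] : List String) ++ g) :: gs) :: rs := by simp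
        rw [show ((done ++ (g :: gs) :: rs, 0) : List (List (List String)) × Nat)
            = (done ++ ((([] : List String) ++ g) :: gs) :: rs, ([] : List String).length) from by simp,
          pvInner_spec g [] gs done rs]
        simp [pvProc]
    rw [hstep, show done ++ pvProc r :: rs = (done ++ [pvProc r]) ++ rs from by simp,
        show done.length + 1 = (done ++ [pvProc r]).length from by simp,
        ih (done ++ [pvProc r])]
    simp

theorem pvA_eq_map (rules : List (List (List String))) :
    reformat_rules rules = rules.map pvProc := by
  unfold reformat_rules
  simpa using pvOuter_spec rules []

theorem pvEnum_tail :
    ∀ (gs : List (List String)) (s : Int), 0 < s →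
      (PySem.List.enumerate gs s).map (fun jg => if jg.1 = 0 then jg.2.map pvFixB else jg.2) = gs := by
  intro gs
  induction gs with
  | nil => intro s _; simp [PySem.List.enumerate_nil]
  | cons g gs ih =>
    intro s hs
    rw [PySem.List.enumerate_cons, List.map_cons]
    rw [if_neg (by omega), ih (s + 1) (by omega)]

theorem pvB_eq_map (rules : List (List (List String))) :
    reformat_rules_alt rules = rules.map pvProc := by
  unfold reformat_rules_alt
  apply List.map_congr_left
  intro rule _
  cases rule with
  | nil => simp [PySem.List.enumerate_nil, pvProc]
  | cons g gs =>
    rw [PySem.List.enumerate_cons, List.map_cons]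
    simp only [pvProc]
    rw [if_pos trivial]
    rw [pvEnum_tail gs (0 + 1) (by omega)]
    have : g.map pvFixB = g.map pvFixA := List.map_congr_left (fun t _ => (pvFix_eq t).symm)
    rw [this]

-- ===== VERDICT (by name: the statement is the Claim_ definition above) =====
theorem reformat_rules_spec : Claim_equal_reformat_rules := by
  intro rules _ _
  unfold Spec_reformat_rules
  rw [pvA_eq_map, pvB_eq_map]
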